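-- pv_equiv track=rewrite | github.com/Eyas-Fath-Allah/Iyacenna | İyacenna3.0.0.py | extract_search_dictionary_from_text
-- ===== SOURCE A (Python) =====
-- def correct_the_errors(pdf_text, error_list):
--     for error in error_list:
--         for index, line in enumerate(pdf_text):
--             if error in line:
--                 corrected_line = line.replace(error, '')
--                 pdf_text[index] = corrected_line
--                 break
--
-- def extract_search_dictionary_from_text(pdf_text, errors, search_dictionary, synonyms_dictionary):
--     control_result = {}
--     result = {}
--     abnormals = {}
--     correct_the_errors(pdf_text, errors)
--     for key in search_dictionary.keys():
--         for line in pdf_text: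
--             if key in line:
--                 index = line.index(key)
--                 if key in synonyms_dictionary.keys() and use_synonyms:
--                     if convert_to_uppercase:
--                         key1 = synonyms_dictionary[key].upper()
--                     elif convert_to_lowercase:
--                         key1 = synonyms_dictionary[key].lower()
--                     else:
--                         key1 = synonyms_dictionary[key]
--                 else:
--                     if convert_to_uppercase:
--                         key1 = key.upper()
--                     elif convert_to_lowercase:
--                         key1 = key.lower()
--                     else:
--                         key1 = key.title()
--                 result[key1] = line[: index - 1].replace(" ", "").replace(",", ".")
--                 control_result[key] = result[key1]
--                 if "*" in result[key1]:
--                     result[key1] = result[key1].replace("*", "")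
--                     if prefix_with_asterisk:
--                         result[key1] = "* " + result[key1]
--                         abnormals[key1] = result[key1]
--                     else:
--                         abnormals[key1] = result[key1]
--                     control_result[key] = result[key1]
--                 break
--     return result, control_result, abnormals
--
-- prefix_with_asterisk = True  # Default is True.
--
-- use_synonyms = True  # Default is True.
--
-- convert_to_uppercase = False  # Default is False.
--
-- convert_to_lowercase = False  # Default is False.
-- ===== SOURCE B (Python) =====
-- # B: single pass over the lines recording each key's first matching line, then one
-- # pass over the keys in order to build the three dicts (A re-scans all lines per key).
-- # Like A, mutates pdf_text in place when removing errors.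
--
-- prefix_with_asterisk = True
-- use_synonyms = True
-- convert_to_uppercase = False
-- convert_to_lowercase = False
--
--
-- def extract_search_dictionary_from_text(pdf_text, errors, search_dictionary, synonyms_dictionary):
--     # remove each error from the first line containing it (same in-place fix as A)
--     for error in errors:
--         i = next((i for i, line in enumerate(pdf_text) if error in line), None)
--         if i is not None:
--             pdf_text[i] = pdf_text[i].replace(error, '')
--     keys = list(search_dictionary.keys())
--     # one pass over the text: first matching line per key
--     first_line = {}
--     for line in pdf_text:
--         for key in keys:
--             if key not in first_line and key in line:
--                 first_line[key] = line
--     result, control_result, abnormals = {}, {}, {}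
--     for key in keys:
--         line = first_line.get(key)
--         if line is None:
--             continue
--         idx = line.index(key)
--         value = line[: idx - 1].replace(" ", "").replace(",", ".")
--         if use_synonyms and key in synonyms_dictionary:
--             base = synonyms_dictionary[key]
--             key1 = base.upper() if convert_to_uppercase else base.lower() if convert_to_lowercase else base
--         else:
--             key1 = key.upper() if convert_to_uppercase else key.lower() if convert_to_lowercase else key.title()
--         if "*" in value:
--             value = value.replace("*", "")
--             if prefix_with_asterisk:
--                 value = "* " + value
--             abnormals[key1] = value
--         result[key1] = value
--         control_result[key] = value
--     return result, control_result, abnormals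
-- ===== Notes on version B (the rewrite author's own statement) =====
-- stated objective: alternative
-- what changed: A rescans the whole text for every key; B makes one pass over the lines recording each key's first matching line in a dict, then emits the three result dicts in a single pass over the keys in order.
import Mathlib
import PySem

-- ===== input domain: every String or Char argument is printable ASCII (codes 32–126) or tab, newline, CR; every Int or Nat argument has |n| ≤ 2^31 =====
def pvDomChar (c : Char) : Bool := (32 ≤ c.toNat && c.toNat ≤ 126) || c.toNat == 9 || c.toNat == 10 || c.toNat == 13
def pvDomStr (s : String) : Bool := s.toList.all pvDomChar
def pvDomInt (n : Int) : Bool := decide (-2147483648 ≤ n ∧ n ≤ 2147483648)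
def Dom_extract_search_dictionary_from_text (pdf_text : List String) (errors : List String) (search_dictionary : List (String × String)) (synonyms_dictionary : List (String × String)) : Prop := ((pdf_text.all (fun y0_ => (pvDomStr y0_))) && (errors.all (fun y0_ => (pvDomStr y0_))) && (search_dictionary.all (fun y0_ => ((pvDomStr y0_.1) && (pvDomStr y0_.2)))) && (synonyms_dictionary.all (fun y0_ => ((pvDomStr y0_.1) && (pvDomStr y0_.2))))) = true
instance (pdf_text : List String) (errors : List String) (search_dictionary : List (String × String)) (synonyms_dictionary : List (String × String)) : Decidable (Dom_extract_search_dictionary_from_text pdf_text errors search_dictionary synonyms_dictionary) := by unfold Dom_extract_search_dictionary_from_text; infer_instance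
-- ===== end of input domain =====

-- B replaces A's per-key rescan of the whole text by one pass over the lines that records each
-- key's first matching line, then emits the three dicts in key order (objective: alternative).
-- Both programs mutate pdf_text in place identically (error removal); equivalence is about the return value.

-- B replaces A's per-key rescan of the whole text by one pass over the lines recording each key's
-- first matching line, then emits the three dicts in key order (objective: alternative).
-- Both Pythons mutate pdf_text in place identically (error removal); the theorems are about the return value.

-- ===== PORT A =====
-- module-level configuration constants of the Python file
def pv_prefix_with_asterisk : Bool := true
def pv_use_synonyms : Bool := true
def pv_convert_to_uppercase : Bool := false
def pv_convert_to_lowercase : Bool := false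

-- str.title(), exact on the ASCII domain (shared library helper — both Pythons call str.title):
-- a letter is uppercased when the previous character is not a letter, lowercased otherwise
def pvTitleChars (cs : List Char) : List Char :=
  (cs.foldl (fun (acc : List Char × Bool) c =>
    if PySem.Chars.isalpha c then
      (acc.1 ++ [if acc.2 then PySem.Chars.lowerChar c else PySem.Chars.upperChar c], true)
    else (acc.1 ++ [c], false)) ([], false)).1

def pvTitle (s : String) : String := String.ofList (pvTitleChars s.toList)

-- correct_the_errors: for each error, replace it in the first line containing it, then break
def pvAFix : List String → String → List String
  | [], _ => []
  | l :: rest, error =>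
    if PySem.Str.isIn error l then PySem.Str.replace l error "" :: rest
    else l :: pvAFix rest error

-- A's key1 computation, branch for branch
def pvKey1A (synD : PySem.Dict String String) (key : String) : String :=
  if synD.contains key && pv_use_synonyms then
    if pv_convert_to_uppercase then PySem.Str.upper (synD.getD key "")
    else if pv_convert_to_lowercase then PySem.Str.lower (synD.getD key "")
    else synD.getD key ""
  else
    if pv_convert_to_uppercase then PySem.Str.upper key
    else if pv_convert_to_lowercase then PySem.Str.lower key
    else pvTitle key

-- A's inner 'for line in pdf_text: if key in line: …; break' (st = (result, control_result, abnormals))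
def pvAScan (synD : PySem.Dict String String) (key : String)
    (st : PySem.Dict String String × PySem.Dict String String × PySem.Dict String String) :
    List String → PySem.Dict String String × PySem.Dict String String × PySem.Dict String String
  | [] => st
  | line :: rest =>
    if PySem.Str.isIn key line then
      let index := PySem.Str.find line key   -- line.index(key): key is in line here, so = find
      let key1 := pvKey1A synD key
      let r1 := st.1.insert key1
        (PySem.Str.replace (PySem.Str.replace (PySem.Str.slice line none (some (index - 1))) " " "") "," ".")
      let c1 := st.2.1.insert key (r1.getD key1 "")
      if PySem.Str.isIn "*" (r1.getD key1 "") then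
        let r2 := r1.insert key1 (PySem.Str.replace (r1.getD key1 "") "*" "")
        if pv_prefix_with_asterisk then
          let r3 := r2.insert key1 ("* " ++ r2.getD key1 "")
          (r3, c1.insert key (r3.getD key1 ""), st.2.2.insert key1 (r3.getD key1 ""))
        else
          (r2, c1.insert key (r2.getD key1 ""), st.2.2.insert key1 (r2.getD key1 ""))
      else (r1, c1, st.2.2)
    else pvAScan synD key st rest

def extract_search_dictionary_from_text (pdf_text : List String) (errors : List String) (search_dictionary : List (String × String)) (synonyms_dictionary : List (String × String)) : (List (String × String)) × (List (String × String)) × (List (String × String)) :=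
  let text := errors.foldl (fun t e => pvAFix t e) pdf_text
  let sdD := PySem.Dict.ofList search_dictionary
  let synD := PySem.Dict.ofList synonyms_dictionary
  let st := sdD.keys.foldl (fun st key => pvAScan synD key st text)
    (PySem.Dict.empty, PySem.Dict.empty, PySem.Dict.empty)
  (st.1.items, st.2.1.items, st.2.2.items)

-- ===== PORT B =====
-- B's error fix: locate the first line containing the error, patch that line
def pvBFix (lines : List String) (error : String) : List String :=
  match lines.findIdx? (fun l => PySem.Str.isIn error l) with
  | some i => lines.set i (PySem.Str.replace (lines.getD i "") error "")
  | none => lines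

-- one pass over the lines: record each key's first matching line
def pvFirstLines (lines : List String) (keys : List String) : PySem.Dict String String :=
  lines.foldl (fun d line =>
    keys.foldl (fun d key =>
      if !d.contains key && PySem.Str.isIn key line then d.insert key line else d) d)
    PySem.Dict.empty

-- B's key1 computation (conditional expressions)
def pvKey1B (synD : PySem.Dict String String) (key : String) : String :=
  if pv_use_synonyms && synD.contains key then
    let base := synD.getD key ""
    if pv_convert_to_uppercase then PySem.Str.upper base
    else if pv_convert_to_lowercase then PySem.Str.lower base
    else base
  else
    if pv_convert_to_uppercase then PySem.Str.upper key
    else if pv_convert_to_lowercase then PySem.Str.lower key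
    else pvTitle key

-- B's per-key emission from the recorded first line ('continue' when there is none)
def pvBStep (synD : PySem.Dict String String)
    (st : PySem.Dict String String × PySem.Dict String String × PySem.Dict String String)
    (key : String) (line? : Option String) :
    PySem.Dict String String × PySem.Dict String String × PySem.Dict String String :=
  match line? with
  | none => st
  | some line =>
    let idx := PySem.Str.find line key
    let v0 := PySem.Str.replace (PySem.Str.replace (PySem.Str.slice line none (some (idx - 1))) " " "") "," "."
    let key1 := pvKey1B synD key
    if PySem.Str.isIn "*" v0 then
      let v := if pv_prefix_with_asterisk then "* " ++ PySem.Str.replace v0 "*" ""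
               else PySem.Str.replace v0 "*" ""
      (st.1.insert key1 v, st.2.1.insert key v, st.2.2.insert key1 v)
    else
      (st.1.insert key1 v0, st.2.1.insert key v0, st.2.2)

def extract_search_dictionary_from_text_alt (pdf_text : List String) (errors : List String) (search_dictionary : List (String × String)) (synonyms_dictionary : List (String × String)) : (List (String × String)) × (List (String × String)) × (List (String × String)) :=
  let text := errors.foldl (fun t e => pvBFix t e) pdf_text
  let sdD := PySem.Dict.ofList search_dictionary
  let synD := PySem.Dict.ofList synonyms_dictionary
  let keys := sdD.keys
  let fl := pvFirstLines text keys
  let st := keys.foldl (fun st key => pvBStep synD st key (fl.get? key))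
    (PySem.Dict.empty, PySem.Dict.empty, PySem.Dict.empty)
  (st.1.items, st.2.1.items, st.2.2.items)

-- ===== PRECONDITION & SPEC =====
def Spec_extract_search_dictionary_from_text (pdf_text : List String) (errors : List String) (search_dictionary : List (String × String)) (synonyms_dictionary : List (String × String)) (out : (List (String × String)) × (List (String × String)) × (List (String × String))) : Prop := out = extract_search_dictionary_from_text_alt pdf_text errors search_dictionary synonyms_dictionary
instance (pdf_text : List String) (errors : List String) (search_dictionary : List (String × String)) (synonyms_dictionary : List (String × String)) (out : (List (String × String)) × (List (String × String)) × (List (String × String))) : Decidable (Spec_extract_search_dictionary_from_text pdf_text errors search_dictionary synonyms_dictionary out) := by unfold Spec_extract_search_dictionary_from_text; infer_instance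

-- ===== CLAIM (what is proved, stated in full; the proofs are below) =====
def Claim_equal_extract_search_dictionary_from_text : Prop := ∀ (pdf_text : List String) (errors : List String) (search_dictionary : List (String × String)) (synonyms_dictionary : List (String × String)), Dom_extract_search_dictionary_from_text pdf_text errors search_dictionary synonyms_dictionary → Spec_extract_search_dictionary_from_text pdf_text errors search_dictionary synonyms_dictionary (extract_search_dictionary_from_text pdf_text errors search_dictionary synonyms_dictionary)

-- ===== LEMMAS AND PROOFS =====

-- the two error-removal passes agree
theorem pvFix_eq (lines : List String) (error : String) : pvAFix lines error = pvBFix lines error := by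
  induction lines with
  | nil => rfl
  | cons l rest ih =>
    by_cases h : PySem.Str.isIn error l = true
    · simp only [pvAFix, pvBFix, h, if_true, List.findIdx?_cons, List.set, List.getD,
        List.getElem?_cons_zero, Option.getD_some]
    · simp only [pvAFix, pvBFix, h, Bool.false_eq_true, if_false, List.findIdx?_cons] at ih ⊢
      cases hf : List.findIdx? (fun l => PySem.Str.isIn error l) rest with
      | none => rw [hf] at ih; simpa [hf] using ih
      | some i =>
        rw [hf] at ih
        simp only [Option.map_some, List.set, List.getD, List.getElem?_cons_succ] at ih ⊢
        rw [ih]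

-- pvFirstLines' inner fold over the keys, at a single line
theorem pvFirstLines_inner (keys : List String) (line key : String)
    (d : PySem.Dict String String) :
    (keys.foldl (fun d key =>
      if !d.contains key && PySem.Str.isIn key line then d.insert key line else d) d).get? key
    = if key ∈ keys ∧ d.get? key = none ∧ PySem.Str.isIn key line = true
      then some line else d.get? key := by
  induction keys generalizing d with
  | nil => simp
  | cons k ks ih =>
    simp only [List.foldl_cons, ih]
    by_cases hk : key = k
    · subst hk
      cases hd : d.get? key with
      | some v =>
        have hc : d.contains key = true := by
          rw [PySem.Dict.contains_eq_isSome_get?, hd]; rfl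
        simp [hc, hd]
      | none =>
        have hc : d.contains key = false := by
          rw [PySem.Dict.contains_eq_isSome_get?, hd]; rfl
        by_cases hin : PySem.Chars.isIn key.toList line.toList = true
        · simp [hc, hin, PySem.Dict.get?_insert_self]
        · simp only [Bool.not_eq_true] at hin
          simp [hc, hd, hin]
    · by_cases hck : (!d.contains k && PySem.Str.isIn k line) = true
      · rw [if_pos hck, PySem.Dict.get?_insert_of_ne _ _ hk]
        simp [hk]
      · rw [if_neg hck]
        simp [hk]

-- pvFirstLines records, for each key of the list, the first line containing it
theorem pvFirstLines_get (lines : List String) (keys : List String) (key : String)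
    (hk : key ∈ keys) :
    (pvFirstLines lines keys).get? key = lines.find? (fun l => PySem.Str.isIn key l) := by
  have main : ∀ (d : PySem.Dict String String),
      (lines.foldl (fun d line =>
        keys.foldl (fun d key =>
          if !d.contains key && PySem.Str.isIn key line then d.insert key line else d) d) d).get? key
      = (d.get? key).or (lines.find? (fun l => PySem.Str.isIn key l)) := by
    induction lines with
    | nil => simp
    | cons line rest ih =>
      intro d
      rw [List.foldl_cons, ih, pvFirstLines_inner]
      cases hd : d.get? key with
      | some v => simp
      | none =>
        by_cases hin : PySem.Chars.isIn key.toList line.toList = true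
        · simp [hk, hin, List.find?]
        · simp only [Bool.not_eq_true] at hin
          simp [hin, List.find?]
  rw [pvFirstLines, main]
  simp

-- the two key1 computations agree (the configuration constants decide the branches)
theorem pvKey1_eq (synD : PySem.Dict String String) (key : String) :
    pvKey1A synD key = pvKey1B synD key := by
  simp [pvKey1A, pvKey1B, pv_use_synonyms, pv_convert_to_uppercase, pv_convert_to_lowercase]

-- A's scan-with-break equals B's step applied to the first matching line
theorem pvAScan_eq_pvBStep (synD : PySem.Dict String String) (key : String)
    (st : PySem.Dict String String × PySem.Dict String String × PySem.Dict String String)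
    (lines : List String) :
    pvAScan synD key st lines = pvBStep synD st key (lines.find? (fun l => PySem.Str.isIn key l)) := by
  induction lines generalizing st with
  | nil => rfl
  | cons line rest ih =>
    by_cases h : PySem.Chars.isIn key.toList line.toList = true
    · rw [List.find?_cons]
      simp only [pvAScan, pvBStep, PySem.Str.isIn_eq, h, if_true, pvKey1_eq,
        pv_prefix_with_asterisk, PySem.Dict.getD_insert_self, PySem.Dict.insert_insert_self]
    · simp only [Bool.not_eq_true] at h
      rw [List.find?_cons]
      simp only [pvAScan, PySem.Str.isIn_eq, h, Bool.false_eq_true, if_false, ih]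

-- ===== VERDICT (by name: the statement is the Claim_ definition above) =====
theorem extract_search_dictionary_from_text_spec : Claim_equal_extract_search_dictionary_from_text := by
  intro pdf_text errors search_dictionary synonyms_dictionary _
  unfold Spec_extract_search_dictionary_from_text
  unfold extract_search_dictionary_from_text extract_search_dictionary_from_text_alt
  have htext : errors.foldl (fun t e => pvAFix t e) pdf_text
      = errors.foldl (fun t e => pvBFix t e) pdf_text :=
    PySem.List.foldl_congr_mem _ _ _ _ (fun t e _ => pvFix_eq t e)
  rw [htext]
  have hfold : ∀ (text : List String) (sdD synD : PySem.Dict String String),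
      sdD.keys.foldl (fun st key => pvAScan synD key st text)
        (PySem.Dict.empty, PySem.Dict.empty, PySem.Dict.empty)
      = sdD.keys.foldl (fun st key => pvBStep synD st key ((pvFirstLines text sdD.keys).get? key))
        (PySem.Dict.empty, PySem.Dict.empty, PySem.Dict.empty) := by
    intro text sdD synD
    apply PySem.List.foldl_congr_mem'
    intro key hkey st
    rw [pvAScan_eq_pvBStep, pvFirstLines_get text sdD.keys key hkey]
  simp only [hfold]
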